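-- pv_equiv track=rewrite | github.com/lishenghui/TinyLLaVA_Factory | tinyllava/data/template/base.py | _get_list_from_message
-- ===== SOURCE A (Python) =====
-- def _get_list_from_message(messages, mode='train'):
--     """
--     messages  ====>  [{from:human, value:message}, {from:gpt, value:message}]
--     """
--     question_list = []
--     answer_list = []
--     first_is_not_question = 0
--     for i, message in enumerate(messages):
--         if i == 0 and message['from'] != 'human':
--             first_is_not_question = 1
--             continue
--         if i % 2 == first_is_not_question:
--             question_list.append(message['value'])
--         else:
--             answer_list.append(message['value'])
--     if mode=='train':
--         assert len(question_list) == len(answer_list) , \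
--             f"qa is not match : length_q:{len(question_list)} vs length_a:{len(answer_list)}"
--     return question_list, answer_list
-- ===== SOURCE B (Python) =====
-- def _get_list_from_message(messages, mode='train'):
--     start = 1 if messages and messages[0]['from'] != 'human' else 0
--     values = [m['value'] for m in messages[start:]]
--     question_list, answer_list = values[0::2], values[1::2]
--     if mode == 'train':
--         assert len(question_list) == len(answer_list), \
--             f"qa is not match : length_q:{len(question_list)} vs length_a:{len(answer_list)}"
--     return question_list, answer_list
-- ===== Notes on version B (the rewrite author's own statement) =====
-- stated objective: simpler
-- what changed: Replaces the enumerate loop with its first_is_not_question flag and per-element parity appends by a computed start offset, one value-projection pass, and two stride-2 slices values[0::2]/values[1::2].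
import Mathlib
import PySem

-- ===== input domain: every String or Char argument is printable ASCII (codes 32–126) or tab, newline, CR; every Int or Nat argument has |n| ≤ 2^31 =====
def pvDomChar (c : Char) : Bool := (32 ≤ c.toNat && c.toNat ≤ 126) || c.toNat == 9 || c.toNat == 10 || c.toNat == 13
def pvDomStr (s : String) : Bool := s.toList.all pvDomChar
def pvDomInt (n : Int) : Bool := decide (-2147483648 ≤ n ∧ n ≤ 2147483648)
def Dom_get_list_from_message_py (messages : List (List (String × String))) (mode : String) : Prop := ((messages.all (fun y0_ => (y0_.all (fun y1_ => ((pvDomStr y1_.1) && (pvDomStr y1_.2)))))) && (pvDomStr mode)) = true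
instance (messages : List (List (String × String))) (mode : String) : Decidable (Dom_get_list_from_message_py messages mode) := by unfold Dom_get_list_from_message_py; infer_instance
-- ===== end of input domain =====

-- B replaces A's enumerate/parity/flag loop by a start offset plus two stride-2 splits (objective: simpler); return value only, neither version mutates its input.

-- dict lookup on an association list (first match), with a default (the key is present on every Pre_ input where it is read)
def pvLookD (m : List (String × String)) (k d : String) : String :=
  match m.find? (fun p => p.1 == k) with
  | some p => p.2
  | none => d

-- ===== PORT A =====
-- loop body of A: state = (question_list, answer_list, first_is_not_question)
def pvBodyA (st : List String × List String × Int) (p : Int × List (String × String)) :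
    List String × List String × Int :=
  if p.1 == 0 && !(pvLookD p.2 "from" "" == "human") then (st.1, st.2.1, 1)
  else if p.1 % 2 == st.2.2 then (st.1 ++ [pvLookD p.2 "value" ""], st.2.1, st.2.2)
  else (st.1, st.2.1 ++ [pvLookD p.2 "value" ""], st.2.2)

def get_list_from_message_py (messages : List (List (String × String))) (mode : String) : List String × List String :=
  let r := (PySem.List.enumerate messages 0).foldl pvBodyA ([], [], 0)
  (r.1, r.2.1)

-- ===== PORT B =====
-- values[0::2], a step-2 slice, ported by hand (exact: every other element from the head)
def strideTwo : List String → List String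
  | [] => []
  | [x] => [x]
  | x :: _ :: rest => x :: strideTwo rest

def get_list_from_message_py_alt (messages : List (List (String × String))) (mode : String) : List String × List String :=
  let start : Nat :=
    match messages with
    | [] => 0
    | m :: _ => if pvLookD m "from" "" == "human" then 0 else 1
  let values := (messages.drop start).map (fun m => pvLookD m "value" "")
  (strideTwo values, strideTwo (values.drop 1))

-- ===== PRECONDITION & SPEC =====
-- Pre_ excludes exactly the inputs where A raises: a KeyError ('from' missing on the first
-- message, or 'value' missing on a processed message) or the mode=='train' assert when the
-- number of processed messages is odd.
def Pre_get_list_from_message_py (messages : List (List (String × String))) (mode : String) : Prop :=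
  match messages with
  | [] => True
  | m :: rest =>
    (m.find? (fun p => p.1 == "from")).isSome = true ∧
    (if (m.find? (fun p => p.1 == "from")).map (·.2) = some "human"
     then (∀ x ∈ m :: rest, (x.find? (fun p => p.1 == "value")).isSome = true) ∧
          (mode = "train" → (rest.length + 1) % 2 = 0)
     else (∀ x ∈ rest, (x.find? (fun p => p.1 == "value")).isSome = true) ∧
          (mode = "train" → rest.length % 2 = 0))
instance (messages : List (List (String × String))) (mode : String) : Decidable (Pre_get_list_from_message_py messages mode) := by
  unfold Pre_get_list_from_message_py; cases messages <;> infer_instance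

def pvWitness_get_list_from_message_py : (List (List (String × String))) × String :=
  ([[("from", "human"), ("value", "hi")], [("from", "gpt"), ("value", "yo")]], "train")

def Spec_get_list_from_message_py (messages : List (List (String × String))) (mode : String) (out : List String × List String) : Prop := out = get_list_from_message_py_alt messages mode
instance (messages : List (List (String × String))) (mode : String) (out : List String × List String) : Decidable (Spec_get_list_from_message_py messages mode out) := by unfold Spec_get_list_from_message_py; infer_instance

-- ===== CLAIM (what is proved, stated in full; the proofs are below) =====
def Claim_equal_get_list_from_message_py : Prop := ∀ (messages : List (List (String × String))) (mode : String), Dom_get_list_from_message_py messages mode → Pre_get_list_from_message_py messages mode → Spec_get_list_from_message_py messages mode (get_list_from_message_py messages mode)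

-- ===== LEMMAS AND PROOFS =====

@[simp] lemma strideTwo_cons (x : String) (l : List String) :
    strideTwo (x :: l) = x :: strideTwo (l.drop 1) := by
  cases l <;> simp [strideTwo]

-- The tail of A's loop (indices ≥ 1) appends the two stride-2 halves of the value list,
-- which half goes to questions being decided by the parity of the start index vs the flag f.
lemma pvFoldA_tail (l : List (List (String × String))) (s : Int) (hs : 1 ≤ s)
    (f : Int) (hf : f = 0 ∨ f = 1) (qs as : List String) :
    (PySem.List.enumerate l s).foldl pvBodyA (qs, as, f) =
      (if s % 2 == f then
        (qs ++ strideTwo (l.map (fun m => pvLookD m "value" "")),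
         as ++ strideTwo ((l.map (fun m => pvLookD m "value" "")).drop 1), f)
      else
        (qs ++ strideTwo ((l.map (fun m => pvLookD m "value" "")).drop 1),
         as ++ strideTwo (l.map (fun m => pvLookD m "value" "")), f)) := by
  induction l generalizing s qs as with
  | nil =>
    simp only [PySem.List.enumerate_nil, List.foldl_nil, List.map_nil, List.drop_nil, strideTwo,
      List.append_nil]
    split <;> rfl
  | cons m tl ih =>
    rw [PySem.List.enumerate_cons, List.foldl_cons]
    have hs0 : (s == 0) = false := by simp; omega
    by_cases hpar : s % 2 = f
    · have hb : pvBodyA (qs, as, f) (s, m) = (qs ++ [pvLookD m "value" ""], as, f) := by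
        simp [pvBodyA, hs0, hpar]
      have h1 : ¬ ((s + 1) % 2 = f) := by omega
      rw [hb, ih (s + 1) (by omega)]
      simp [hpar, h1]
    · have hb : pvBodyA (qs, as, f) (s, m) = (qs, as ++ [pvLookD m "value" ""], f) := by
        simp [pvBodyA, hs0, hpar]
      have h1 : (s + 1) % 2 = f := by omega
      rw [hb, ih (s + 1) (by omega)]
      simp [hpar, h1]

-- ===== VERDICT (by name: the statement is the Claim_ definition above) =====
theorem get_list_from_message_py_spec : Claim_equal_get_list_from_message_py := by
  intro messages mode _ _
  unfold Spec_get_list_from_message_py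
  cases messages with
  | nil => rfl
  | cons m rest =>
    unfold get_list_from_message_py get_list_from_message_py_alt
    rw [PySem.List.enumerate_cons, List.foldl_cons]
    by_cases hh : pvLookD m "from" "" = "human"
    · have hb : pvBodyA (([] : List String), ([] : List String), (0 : Int)) (0, m) =
          ([pvLookD m "value" ""], [], 0) := by
        simp [pvBodyA, hh]
      rw [hb, pvFoldA_tail rest (0 + 1) (by omega) 0 (Or.inl rfl)]
      simp [hh]
    · have hb : pvBodyA (([] : List String), ([] : List String), (0 : Int)) (0, m) =
          ([], [], 1) := by
        simp [pvBodyA, hh]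
      rw [hb, pvFoldA_tail rest (0 + 1) (by omega) 1 (Or.inr rfl)]
      simp [hh]
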